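-- pv_equiv track=rewrite | github.com/Levan-Demetrashvili/jack-compiler | utilis.py | is_array_expression
-- ===== SOURCE A (Python) =====
-- def is_array_expression(expr):
--   depth_paren = 0
--   i = 0
--   while i < len(expr):
--     c = expr[i]
--     if c == '(':
--       depth_paren += 1
--     elif c == ')':
--       depth_paren -= 1
--     elif c == '[' and depth_paren == 0:
--       return True
--     i += 1
--   return False
-- ===== SOURCE B (Python) =====
-- def is_array_expression(expr):
--   # Two-pass: build the paren-depth profile before each character, then scan.
--   depths = [0]
--   for c in expr:
--     depths.append(depths[-1] + (1 if c == '(' else -1 if c == ')' else 0))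
--   return any(c == '[' and d == 0 for c, d in zip(expr, depths))
-- ===== Notes on version B (the rewrite author's own statement) =====
-- stated objective: alternative
-- what changed: Replaces the stateful index loop with early return by a two-pass decomposition: build the prefix-sum depth profile, then a single any-scan over character/depth pairs.
import Mathlib
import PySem

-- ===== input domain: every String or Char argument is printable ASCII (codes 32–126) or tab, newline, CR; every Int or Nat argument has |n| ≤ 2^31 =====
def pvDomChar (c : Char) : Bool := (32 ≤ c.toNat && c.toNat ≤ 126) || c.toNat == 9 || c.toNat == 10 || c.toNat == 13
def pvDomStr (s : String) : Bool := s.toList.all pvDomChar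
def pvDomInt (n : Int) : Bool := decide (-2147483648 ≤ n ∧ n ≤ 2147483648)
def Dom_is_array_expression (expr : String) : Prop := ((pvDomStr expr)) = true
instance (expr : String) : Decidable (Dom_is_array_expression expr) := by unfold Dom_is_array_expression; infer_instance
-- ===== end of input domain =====

-- B builds the prefix-sum paren-depth profile and scans it; A's stateful early-return loop; equal on all inputs.
-- ===== PORT A =====
def pvALoop (cs : List Char) (depth : Int) : Bool :=
  match cs with
  | [] => false
  | c :: rest =>
    if c = '(' then pvALoop rest (depth + 1)
    else if c = ')' then pvALoop rest (depth - 1)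
    else if c = '[' ∧ depth = 0 then true
    else pvALoop rest depth

def is_array_expression (expr : String) : Bool := pvALoop expr.toList 0

-- ===== PORT B =====
-- depth profile before each character: scanl mirrors Source B's append-running-sum loop
def pvDelta (c : Char) : Int := if c = '(' then 1 else if c = ')' then -1 else 0

def is_array_expression_alt (expr : String) : Bool :=
  let depths := expr.toList.scanl (fun d c => d + pvDelta c) 0
  (expr.toList.zip depths).any (fun p => p.1 == '[' && p.2 == 0)

-- ===== PRECONDITION & SPEC =====
def Spec_is_array_expression (expr : String) (out : Bool) : Prop := out = is_array_expression_alt expr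
instance (expr : String) (out : Bool) : Decidable (Spec_is_array_expression expr out) := by unfold Spec_is_array_expression; infer_instance

-- ===== CLAIM (what is proved, stated in full; the proofs are below) =====
def Claim_equal_is_array_expression : Prop := ∀ (expr : String), Dom_is_array_expression expr → Spec_is_array_expression expr (is_array_expression expr)

-- ===== LEMMAS AND PROOFS =====

-- ===== VERDICT (by name: the statement is the Claim_ definition above) =====
lemma pvALoop_eq (cs : List Char) (d : Int) :
    pvALoop cs d = (cs.zip (cs.scanl (fun d c => d + pvDelta c) d)).any
      (fun p => p.1 == '[' && p.2 == 0) := by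
  induction cs generalizing d with
  | nil => simp [pvALoop]
  | cons c rest ih =>
    simp only [pvALoop, List.scanl_cons, List.zip_cons_cons, List.any_cons]
    by_cases h1 : c = '('
    · subst h1; simp [pvDelta, ih]
    · by_cases h2 : c = ')'
      · subst h2; simp [pvDelta, h1, ih, sub_eq_add_neg]
      · by_cases h3 : c = '[' ∧ d = 0
        · simp [h3.1, h3.2]
        · have : ¬ (c == '[' && d == 0) = true := by
            simp only [Bool.and_eq_true, beq_iff_eq]
            exact fun hh => h3 ⟨hh.1, hh.2⟩
          simp [h1, h2, h3, this, ih, pvDelta]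

theorem is_array_expression_spec : Claim_equal_is_array_expression := by
  intro expr _
  unfold Spec_is_array_expression is_array_expression is_array_expression_alt
  exact pvALoop_eq expr.toList 0
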